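-- pv_equiv track=rewrite | github.com/skwwnl/BaekjoonHub | 프로그래머스/0/120861. 캐릭터의 좌표/캐릭터의 좌표.py | solution
-- ===== SOURCE A (Python) =====
-- def solution(keyinput, board):
--     answer = [0, 0]
--     a = board[0] // 2
--     b = board[1] // 2
--     for i in keyinput:
--         if i == "left":
--             if answer[0] - 1 < -a:
--                 continue
--             answer[0] -= 1
--         elif i == "right":
--             if answer[0] + 1 > a:
--                 continue
--             answer[0] += 1
--         elif i == "down":
--             if answer[1] - 1 < -b:
--                 continue
--             answer[1] -= 1
--         elif i == "up":
--             if answer[1] + 1 > b: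
--                 continue
--             answer[1] += 1
--     return answer
-- ===== SOURCE B (Python) =====
-- def solution(keyinput, board):
--     # Composition-of-clamps algorithm: each key is a clamp-shift map y -> min(hi, max(lo, y+d));
--     # compose all maps per axis into one canonical triple (lo, hi, shift), then apply it to 0.
--     DELTA = {"left": (-1, 0), "right": (1, 0), "down": (0, -1), "up": (0, 1)}
--     moves = [DELTA.get(k, (0, 0)) for k in keyinput]
--     answer = []
--     for axis in (0, 1):
--         lim = board[axis] // 2
--         if lim < 0:
--             # degenerate board: no destination is ever in range, so the coordinate stays 0
--             answer.append(0)
--             continue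
--         lo, hi, shift = -lim, lim, 0
--         for mv in moves:
--             d = mv[axis]
--             if d:
--                 lo = min(lim, max(-lim, lo + d))
--                 hi = min(lim, max(-lim, hi + d))
--                 shift += d
--         answer.append(min(hi, max(lo, shift)))
--     return answer
-- ===== Notes on version B (the rewrite author's own statement) =====
-- stated objective: alternative
-- what changed: Instead of simulating the walk step by step with four guard-and-continue branches on a mutable pair, B treats each key as a clamp-shift map y -> min(hi, max(lo, y+d)), composes all maps per axis into one canonical (lo, hi, shift) triple in a single pass (first translating keys to (dx,dy) deltas via a lookup table), and evaluates the composite once at 0.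
import Mathlib
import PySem

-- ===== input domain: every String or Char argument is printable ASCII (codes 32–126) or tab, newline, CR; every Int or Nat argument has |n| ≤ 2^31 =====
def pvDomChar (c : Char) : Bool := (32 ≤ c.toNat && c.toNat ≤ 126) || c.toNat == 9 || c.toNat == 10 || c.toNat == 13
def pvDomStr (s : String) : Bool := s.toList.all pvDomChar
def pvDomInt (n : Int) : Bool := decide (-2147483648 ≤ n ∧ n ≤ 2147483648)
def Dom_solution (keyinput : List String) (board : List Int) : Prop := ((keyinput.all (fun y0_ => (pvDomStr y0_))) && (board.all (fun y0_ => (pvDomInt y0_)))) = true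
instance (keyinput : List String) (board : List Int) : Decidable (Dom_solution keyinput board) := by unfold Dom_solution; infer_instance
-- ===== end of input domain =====

-- B replaces A's step-by-step simulation by composing the per-key clamp-shift maps
-- y ↦ min(hi, max(lo, y+d)) into one canonical triple (lo, hi, shift) per axis and
-- evaluating the composite once at 0 (objective: alternative).

-- ===== PORT A =====
-- the loop body of A: state is the (x, y) pair, branches in A's order
def solutionStep (a b : Int) (ans : Int × Int) (i : String) : Int × Int :=
  if i = "left" then
    (if ans.1 - 1 < -a then ans else (ans.1 - 1, ans.2))
  else if i = "right" then
    (if ans.1 + 1 > a then ans else (ans.1 + 1, ans.2))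
  else if i = "down" then
    (if ans.2 - 1 < -b then ans else (ans.1, ans.2 - 1))
  else if i = "up" then
    (if ans.2 + 1 > b then ans else (ans.1, ans.2 + 1))
  else ans

def solution (keyinput : List String) (board : List Int) : List Int :=
  let a := PySem.Int.floordiv (PySem.List.pyGetD board 0 0) 2
  let b := PySem.Int.floordiv (PySem.List.pyGetD board 1 0) 2
  let ans := keyinput.foldl (solutionStep a b) (0, 0)
  [ans.1, ans.2]

-- ===== PORT B =====
-- the (dx, dy) delta of one key (Source B's DELTA.get(k, (0, 0)))
def deltaOf (k : String) : Int × Int :=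
  if k = "left" then (-1, 0)
  else if k = "right" then (1, 0)
  else if k = "down" then (0, -1)
  else if k = "up" then (0, 1)
  else (0, 0)

def clampTo (lim z : Int) : Int := min lim (max (-lim) z)

-- composing one clamp-shift map with step d onto the accumulated triple (lo, hi, shift)
def compStep (lim : Int) (st : Int × Int × Int) (d : Int) : Int × Int × Int :=
  if d ≠ 0 then (clampTo lim (st.1 + d), clampTo lim (st.2.1 + d), st.2.2 + d) else st

-- one axis of Source B's loop: fold the composition, evaluate the composite at 0
def axisWalk (ds : List Int) (lim : Int) : Int :=
  if lim < 0 then 0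
  else
    let st := ds.foldl (compStep lim) (-lim, lim, 0)
    min st.2.1 (max st.1 st.2.2)

def solution_alt (keyinput : List String) (board : List Int) : List Int :=
  let moves := keyinput.map deltaOf
  [axisWalk (moves.map Prod.fst) (PySem.Int.floordiv (PySem.List.pyGetD board 0 0) 2),
   axisWalk (moves.map Prod.snd) (PySem.Int.floordiv (PySem.List.pyGetD board 1 0) 2)]

-- ===== PRECONDITION & SPEC =====
-- A does board[0] and board[1]: it raises IndexError unless board has at least two entries.
def Pre_solution (keyinput : List String) (board : List Int) : Prop := 2 ≤ board.length
instance (keyinput : List String) (board : List Int) : Decidable (Pre_solution keyinput board) := by unfold Pre_solution; infer_instance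
def pvWitness_solution : List String × List Int := (["left", "up", "up"], [5, 4])

def Spec_solution (keyinput : List String) (board : List Int) (out : List Int) : Prop := out = solution_alt keyinput board
instance (keyinput : List String) (board : List Int) (out : List Int) : Decidable (Spec_solution keyinput board out) := by unfold Spec_solution; infer_instance

-- ===== CLAIM (what is proved, stated in full; the proofs are below) =====
def Claim_equal_solution : Prop := ∀ (keyinput : List String) (board : List Int), Dom_solution keyinput board → Pre_solution keyinput board → Spec_solution keyinput board (solution keyinput board)

-- ===== LEMMAS AND PROOFS =====

-- proof-only per-axis view of A's step (neg/pos are the two keys that move this axis)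
def aStep (neg pos : String) (lim p : Int) (i : String) : Int :=
  if i = neg then (if p - 1 < -lim then p else p - 1)
  else if i = pos then (if p + 1 > lim then p else p + 1)
  else p

theorem step_fst (a b x y : Int) (i : String) :
    (solutionStep a b (x, y) i).1 = aStep "left" "right" a x i := by
  unfold solutionStep aStep
  by_cases h1 : i = "left" <;> by_cases h2 : i = "right" <;>
    by_cases h3 : i = "down" <;> by_cases h4 : i = "up" <;>
    simp_all <;> split_ifs <;> rfl

theorem step_snd (a b x y : Int) (i : String) :
    (solutionStep a b (x, y) i).2 = aStep "down" "up" b y i := by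
  unfold solutionStep aStep
  by_cases h1 : i = "left" <;> by_cases h2 : i = "right" <;>
    by_cases h3 : i = "down" <;> by_cases h4 : i = "up" <;>
    simp_all <;> split_ifs <;> rfl

theorem fold_split (a b : Int) : ∀ (ks : List String) (x y : Int),
    ks.foldl (solutionStep a b) (x, y) =
      (ks.foldl (aStep "left" "right" a) x, ks.foldl (aStep "down" "up" b) y) := by
  intro ks
  induction ks with
  | nil => intro x y; rfl
  | cons i ks ih =>
    intro x y
    simp only [List.foldl_cons]
    have hpair : solutionStep a b (x, y) i =
        (aStep "left" "right" a x i, aStep "down" "up" b y i) := by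
      rw [← step_fst a b x y i, ← step_snd a b x y i]
    rw [hpair, ih]

-- negative half-width: A can never move along that axis
theorem aStep_neg (neg pos : String) (lim : Int) (hlim : lim < 0) (i : String) :
    aStep neg pos lim 0 i = 0 := by
  unfold aStep; split_ifs <;> omega

theorem fold_neg (neg pos : String) (lim : Int) (hlim : lim < 0) :
    ∀ (ks : List String), ks.foldl (aStep neg pos lim) 0 = 0 := by
  intro ks
  induction ks with
  | nil => rfl
  | cons i ks ih => simp only [List.foldl_cons, aStep_neg neg pos lim hlim i, ih]

-- one clamp-shift composition step, d = -1: triple invariants and agreement with A's move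
theorem comp_move_neg (lim lo hi shift : Int) (hlim : 0 ≤ lim)
    (h1 : -lim ≤ lo) (h2 : lo ≤ hi) (h3 : hi ≤ lim) :
    -lim ≤ clampTo lim (lo + -1) ∧ clampTo lim (lo + -1) ≤ clampTo lim (hi + -1) ∧
    clampTo lim (hi + -1) ≤ lim ∧
    (if min hi (max lo shift) - 1 < -lim then min hi (max lo shift)
     else min hi (max lo shift) - 1) =
      min (clampTo lim (hi + -1)) (max (clampTo lim (lo + -1)) (shift + -1)) := by
  unfold clampTo
  simp only [min_def, max_def]
  split_ifs <;> omega

-- one clamp-shift composition step, d = 1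
theorem comp_move_pos (lim lo hi shift : Int) (hlim : 0 ≤ lim)
    (h1 : -lim ≤ lo) (h2 : lo ≤ hi) (h3 : hi ≤ lim) :
    -lim ≤ clampTo lim (lo + 1) ∧ clampTo lim (lo + 1) ≤ clampTo lim (hi + 1) ∧
    clampTo lim (hi + 1) ≤ lim ∧
    (if min hi (max lo shift) + 1 > lim then min hi (max lo shift)
     else min hi (max lo shift) + 1) =
      min (clampTo lim (hi + 1)) (max (clampTo lim (lo + 1)) (shift + 1)) := by
  unfold clampTo
  simp only [min_def, max_def]
  split_ifs <;> omega

-- core invariant: the composed clamp triple evaluated at 0 tracks A's position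
theorem comp_invariant (neg pos : String) (hne : neg ≠ pos) (lim : Int) (hlim : 0 ≤ lim) :
    ∀ (ks : List String) (lo hi shift p : Int),
    -lim ≤ lo → lo ≤ hi → hi ≤ lim → p = min hi (max lo shift) →
    (let st := ks.foldl (fun s k => compStep lim s
        ((if k = pos then (1:Int) else 0) - (if k = neg then 1 else 0))) (lo, hi, shift)
     min st.2.1 (max st.1 st.2.2)) = ks.foldl (aStep neg pos lim) p := by
  intro ks
  induction ks with
  | nil =>
    intro lo hi shift p _ _ _ hp
    simpa using hp.symm
  | cons i ks ih =>
    intro lo hi shift p h1 h2 h3 hp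
    simp only [List.foldl_cons]
    by_cases hin : i = neg
    · have hip : i ≠ pos := fun h => hne (hin.symm.trans h)
      have hd : ((if i = pos then (1:Int) else 0) - (if i = neg then 1 else 0)) = -1 := by
        simp [hin, hne]
      rw [hd]
      have hstep : compStep lim (lo, hi, shift) (-1) =
          (clampTo lim (lo + -1), clampTo lim (hi + -1), shift + -1) := by
        unfold compStep; norm_num
      rw [hstep]
      obtain ⟨g1, g2, g3, g4⟩ := comp_move_neg lim lo hi shift hlim h1 h2 h3
      have ha : aStep neg pos lim p i =
          min (clampTo lim (hi + -1)) (max (clampTo lim (lo + -1)) (shift + -1)) := by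
        unfold aStep
        rw [if_pos hin, hp]
        exact g4
      rw [ha]
      exact ih _ _ _ _ g1 g2 g3 rfl
    · by_cases hip : i = pos
      · have hd : ((if i = pos then (1:Int) else 0) - (if i = neg then 1 else 0)) = 1 := by
          simp [hip, Ne.symm hne]
        rw [hd]
        have hstep : compStep lim (lo, hi, shift) 1 =
            (clampTo lim (lo + 1), clampTo lim (hi + 1), shift + 1) := by
          unfold compStep; norm_num
        rw [hstep]
        obtain ⟨g1, g2, g3, g4⟩ := comp_move_pos lim lo hi shift hlim h1 h2 h3
        have ha : aStep neg pos lim p i =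
            min (clampTo lim (hi + 1)) (max (clampTo lim (lo + 1)) (shift + 1)) := by
          unfold aStep
          rw [if_neg hin, if_pos hip, hp]
          exact g4
        rw [ha]
        exact ih _ _ _ _ g1 g2 g3 rfl
      · have hd : ((if i = pos then (1:Int) else 0) - (if i = neg then 1 else 0)) = 0 := by
          simp [hin, hip]
        rw [hd]
        have hstep : compStep lim (lo, hi, shift) 0 = (lo, hi, shift) := by
          unfold compStep; norm_num
        rw [hstep]
        have ha : aStep neg pos lim p i = p := by
          unfold aStep; rw [if_neg hin, if_neg hip]
        rw [ha]
        exact ih _ _ _ _ h1 h2 h3 hp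

-- one axis: A's per-axis fold from 0 equals B's axisWalk on the delta components
theorem axis_eq (neg pos : String) (hne : neg ≠ pos) (lim : Int) (ks : List String)
    (proj : String → Int)
    (hproj : ∀ k, proj k = (if k = pos then (1:Int) else 0) - (if k = neg then 1 else 0)) :
    axisWalk (ks.map proj) lim = ks.foldl (aStep neg pos lim) 0 := by
  unfold axisWalk
  by_cases hlim : lim < 0
  · rw [if_pos hlim, fold_neg neg pos lim hlim ks]
  · rw [if_neg hlim]
    rw [List.foldl_map]
    have hfun : (fun s k => compStep lim s (proj k)) =
        (fun s k => compStep lim s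
          ((if k = pos then (1:Int) else 0) - (if k = neg then 1 else 0))) := by
      funext s k; rw [hproj k]
    rw [hfun]
    have h0 : (0 : Int) = min lim (max (-lim) 0) := by
      simp only [min_def, max_def]; split_ifs <;> omega
    exact comp_invariant neg pos hne lim (by omega) ks (-lim) lim 0 0
      (le_refl _) (by omega) (le_refl _) h0

-- the axis delta of a key equals the relevant component of deltaOf
theorem delta_fst (k : String) :
    (deltaOf k).1 = (if k = "right" then 1 else 0) - (if k = "left" then 1 else 0) := by
  unfold deltaOf
  by_cases h1 : k = "left" <;> by_cases h2 : k = "right" <;>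
    by_cases h3 : k = "down" <;> by_cases h4 : k = "up" <;> simp_all

theorem delta_snd (k : String) :
    (deltaOf k).2 = (if k = "up" then 1 else 0) - (if k = "down" then 1 else 0) := by
  unfold deltaOf
  by_cases h1 : k = "left" <;> by_cases h2 : k = "right" <;>
    by_cases h3 : k = "down" <;> by_cases h4 : k = "up" <;> simp_all

-- ===== VERDICT (by name: the statement is the Claim_ definition above) =====
theorem solution_spec : Claim_equal_solution := by
  intro keyinput board _ _
  unfold Spec_solution solution solution_alt
  simp only [List.map_map]
  rw [fold_split _ _ keyinput 0 0]
  rw [axis_eq "left" "right" (by decide) _ keyinput (Prod.fst ∘ deltaOf)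
        (fun k => delta_fst k),
      axis_eq "down" "up" (by decide) _ keyinput (Prod.snd ∘ deltaOf)
        (fun k => delta_snd k)]
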